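-- pv_equiv track=rewrite | github.com/ShuaiyiHuang/calabash | history_code/calabash_gaft2.py | state_tointeger
-- ===== SOURCE A (Python) =====
-- def state_tointeger(state):
--     state=list(state)
--     strformat_int=''
--     for i,nodestate in enumerate(state):
--         if nodestate>0:
--             strformat_int+='0'
--         else:
--             strformat_int+='1'
--     integer=int(strformat_int)
--     return integer
-- ===== SOURCE B (Python) =====
-- def state_tointeger(state):
--     integer = 0
--     for nodestate in state:
--         integer = integer * 10 + (0 if nodestate > 0 else 1)
--     return integer
-- ===== Notes on version B (the rewrite author's own statement) =====
-- stated objective: simpler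
-- what changed: B replaces string building plus int() parsing by direct Horner arithmetic accumulation (integer = integer*10 + digit), with no intermediate string.
import Mathlib
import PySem

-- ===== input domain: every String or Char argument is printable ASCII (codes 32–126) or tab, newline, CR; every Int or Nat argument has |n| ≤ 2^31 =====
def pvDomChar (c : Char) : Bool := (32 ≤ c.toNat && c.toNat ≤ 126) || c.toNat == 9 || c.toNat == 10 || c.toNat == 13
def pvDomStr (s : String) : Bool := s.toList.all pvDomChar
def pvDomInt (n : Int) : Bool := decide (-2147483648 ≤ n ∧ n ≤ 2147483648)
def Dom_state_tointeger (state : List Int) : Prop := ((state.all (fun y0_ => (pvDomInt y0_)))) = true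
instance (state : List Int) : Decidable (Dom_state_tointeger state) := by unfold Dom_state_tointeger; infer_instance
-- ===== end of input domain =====

-- B replaces string building + int() parsing by direct Horner accumulation (simpler; return value only, no mutation).

-- ===== PORT A =====
-- int(s) in A is only ever applied to the nonempty string of '0'/'1' characters the loop
-- builds (empty string / >4300 chars excluded by Pre_); this hand port of that digit parse
-- is exact there: left-to-right decimal accumulation of the digit values.
def pvIntOfDigitChars (cs : List Char) : Int :=
  cs.foldl (fun a c => a * 10 + ((c.toNat : Int) - 48)) 0

def state_tointeger (state : List Int) : Int :=
  let strformat_int : List Char :=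
    state.foldl (fun s nodestate => s ++ [if nodestate > 0 then '0' else '1']) []
  pvIntOfDigitChars strformat_int

-- ===== PORT B =====
def state_tointeger_alt (state : List Int) : Int :=
  state.foldl (fun integer nodestate => integer * 10 + (if nodestate > 0 then 0 else 1)) 0

-- ===== PRECONDITION & SPEC =====
-- Pre_ excludes exactly the inputs on which Python A raises ValueError in int():
-- the empty list (int('')) and lists of more than 4300 elements (CPython's default
-- integer-string conversion digit limit).
def Pre_state_tointeger (state : List Int) : Prop := state ≠ [] ∧ state.length ≤ 4300
instance (state : List Int) : Decidable (Pre_state_tointeger state) := by unfold Pre_state_tointeger; infer_instance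
def pvWitness_state_tointeger : List Int := ([1, -2, 0])

def Spec_state_tointeger (state : List Int) (out : Int) : Prop := out = state_tointeger_alt state
instance (state : List Int) (out : Int) : Decidable (Spec_state_tointeger state out) := by unfold Spec_state_tointeger; infer_instance

-- ===== CLAIM (what is proved, stated in full; the proofs are below) =====
def Claim_equal_state_tointeger : Prop := ∀ (state : List Int), Dom_state_tointeger state → Pre_state_tointeger state → Spec_state_tointeger state (state_tointeger state)

-- ===== LEMMAS AND PROOFS =====

-- A's loop builds exactly the map of the digit characters.
theorem foldl_append_map (l : List Int) (s : List Char) :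
    l.foldl (fun s nodestate => s ++ [if nodestate > 0 then '0' else '1']) s
      = s ++ l.map (fun nodestate => if nodestate > 0 then '0' else '1') := by
  induction l generalizing s with
  | nil => simp
  | cons x xs ih => simp [List.foldl_cons, ih]

-- Parsing the digit string is the same Horner fold as B's direct accumulation.
theorem parse_eq_horner (l : List Int) :
    pvIntOfDigitChars (l.map (fun nodestate => if nodestate > 0 then '0' else '1'))
      = state_tointeger_alt l := by
  unfold pvIntOfDigitChars state_tointeger_alt
  rw [List.foldl_map]
  have hf : (fun (a : Int) (x : Int) => a * 10 + (((if x > 0 then '0' else '1').toNat : Int) - 48))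
      = fun (a : Int) (x : Int) => a * 10 + (if x > 0 then 0 else 1) := by
    funext a x
    by_cases h : x > 0 <;> simp [h] <;> norm_num
  rw [hf]

-- ===== VERDICT (by name: the statement is the Claim_ definition above) =====
theorem state_tointeger_spec : Claim_equal_state_tointeger := by
  intro state _ _
  unfold Spec_state_tointeger state_tointeger
  rw [foldl_append_map, List.nil_append, parse_eq_horner]
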